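-- pv_equiv track=rewrite | github.com/dpiraner/Micetro | Auxil.py | GetQuotedStringAfterLabel
-- ===== SOURCE A (Python) =====
-- def GetQuotedStringAfterLabel(s, label):
--     if label in s:
--         start = s.index(label) + len(label)
--         startQuoteIndex = -1
--         endQuoteIndex = -1
--         for index, char in enumerate(s):
--             if index >= start:
--                 if char == '"' and startQuoteIndex == -1:
--                     startQuoteIndex = index
--                 elif char == '"':
--                     endQuoteIndex = index
--                     break
--
--         if startQuoteIndex >= 0 and endQuoteIndex > startQuoteIndex:
--             return s[startQuoteIndex + 1 : endQuoteIndex]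
--
--     return ""
-- ===== SOURCE B (Python) =====
-- def GetQuotedStringAfterLabel(s, label):
--     if label not in s:
--         return ""
--     chunks = s[s.index(label) + len(label):].split('"')
--     return chunks[1] if len(chunks) >= 3 else ""
-- ===== Notes on version B (the rewrite author's own statement) =====
-- stated objective: alternative
-- what changed: Instead of scanning with an enumerate state-machine for the two quote indices, B splits the tail after the label on '"' into segments and returns the second segment when at least three segments exist.
import Mathlib
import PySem

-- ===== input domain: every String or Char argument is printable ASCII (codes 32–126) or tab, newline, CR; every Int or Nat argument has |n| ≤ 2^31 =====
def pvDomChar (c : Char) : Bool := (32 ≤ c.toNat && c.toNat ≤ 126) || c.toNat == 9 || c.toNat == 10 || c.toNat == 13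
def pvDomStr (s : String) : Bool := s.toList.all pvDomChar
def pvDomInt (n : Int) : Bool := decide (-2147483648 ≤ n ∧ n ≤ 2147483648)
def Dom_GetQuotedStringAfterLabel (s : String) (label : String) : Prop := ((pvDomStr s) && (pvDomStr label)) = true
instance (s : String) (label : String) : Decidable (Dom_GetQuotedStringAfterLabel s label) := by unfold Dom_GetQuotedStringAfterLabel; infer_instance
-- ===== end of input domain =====

-- B replaces A's enumerate state-machine by splitting the tail after the label on '"' and taking the second segment; objective: alternative decomposition.

-- ===== PORT A =====
-- the `for index, char in enumerate(s)` loop with its two flags and `break`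
def pvALoop (l : List (Int × Char)) (start sq eq : Int) : Int × Int :=
  match l with
  | [] => (sq, eq)
  | (i, c) :: rest =>
    if start ≤ i then
      if c == '"' && sq == -1 then pvALoop rest start i eq
      else if c == '"' then (sq, i)
      else pvALoop rest start sq eq
    else pvALoop rest start sq eq

def GetQuotedStringAfterLabel (s : String) (label : String) : String :=
  if PySem.Str.isIn label s then
    let start := PySem.Str.find s label + PySem.Str.len label
    let r := pvALoop (PySem.List.enumerate s.toList 0) start (-1) (-1)
    if 0 ≤ r.1 ∧ r.1 < r.2 then PySem.Str.slice s (some (r.1 + 1)) (some r.2)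
    else ""
  else ""

-- ===== PORT B =====
-- Source B: if label not in s: return ""; chunks = s[s.index(label)+len(label):].split('"');
--       return chunks[1] if len(chunks) >= 3 else ""
def GetQuotedStringAfterLabel_alt (s : String) (label : String) : String :=
  if PySem.Str.isIn label s then
    let tail := PySem.Str.slice s (some (PySem.Str.find s label + PySem.Str.len label)) none
    let chunks := PySem.Chars.splitOn tail.toList ['"']
    if 3 ≤ chunks.length then String.ofList (chunks.getD 1 []) else ""
  else ""

-- ===== PRECONDITION & SPEC =====
def Spec_GetQuotedStringAfterLabel (s : String) (label : String) (out : String) : Prop := out = GetQuotedStringAfterLabel_alt s label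
instance (s : String) (label : String) (out : String) : Decidable (Spec_GetQuotedStringAfterLabel s label out) := by unfold Spec_GetQuotedStringAfterLabel; infer_instance

-- ===== CLAIM (what is proved, stated in full; the proofs are below) =====
def Claim_equal_GetQuotedStringAfterLabel : Prop := ∀ (s : String) (label : String), Dom_GetQuotedStringAfterLabel s label → Spec_GetQuotedStringAfterLabel s label (GetQuotedStringAfterLabel s label)

-- ===== LEMMAS AND PROOFS =====

-- first '"' in cs, as an Option Nat
def pvQ (cs : List Char) : Option Nat := cs.findIdx? (· == '"')

-- reference shape of splitting on '"'
def pvSplit : List Char → List (List Char)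
  | [] => [[]]
  | c :: t => if c = '"' then [] :: pvSplit t else (pvSplit t).modifyHead (c :: ·)

theorem pvSplit_ne_nil (cs : List Char) : pvSplit cs ≠ [] := by
  cases cs with
  | nil => simp [pvSplit]
  | cons c t =>
    simp only [pvSplit]
    split
    · simp
    · cases h : pvSplit t with
      | nil => exact absurd h (pvSplit_ne_nil t)
      | cons a r => simp [List.modifyHead]

theorem pvGo_eq (l : List Char) (fuel : Nat) (cur : List Char) (acc : List (List Char))
    (h : l.length < fuel) :
    PySem.Chars.splitOn.go ['"'] fuel l cur acc =
      acc.reverse ++ (pvSplit l).modifyHead (cur.reverse ++ ·) := by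
  induction l generalizing fuel cur acc with
  | nil =>
    match fuel, h with
    | (n+1), _ =>
      rw [PySem.Chars.splitOn.go.eq_def]
      simp [pvSplit]
  | cons c t ih =>
    match fuel, h with
    | (n+1), h =>
      rw [PySem.Chars.splitOn.go.eq_def]
      simp only []
      by_cases hc : c = '"'
      · have hp : (['"'].isPrefixOf (c :: t)) = true := by
          simp [List.isPrefixOf, hc]
        rw [hp]
        simp only [if_pos rfl]
        rw [show List.drop (['"'].length) (c :: t) = t from by simp]
        rw [ih n [] (cur.reverse :: acc) (by simp at h; omega)]
        simp [pvSplit, hc]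
        cases hs : pvSplit t with
        | nil => exact absurd hs (pvSplit_ne_nil t)
        | cons a r => simp [List.modifyHead]
      · have hp : (['"'].isPrefixOf (c :: t)) = false := by
          simp only [List.isPrefixOf, Bool.and_eq_false_iff]
          left; simp; exact fun h' => hc h'.symm
        rw [hp]
        simp only [Bool.false_eq_true, if_false]
        rw [ih n (c :: cur) acc (by simp at h; omega)]
        simp only [pvSplit, if_neg hc]
        cases hs : pvSplit t with
        | nil => exact absurd hs (pvSplit_ne_nil t)
        | cons a r => simp [List.modifyHead]

theorem pvSplitOn_quote (cs : List Char) :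
    PySem.Chars.splitOn cs ['"'] = pvSplit cs := by
  unfold PySem.Chars.splitOn
  rw [pvGo_eq cs (cs.length + 1) [] [] (by omega)]
  simp [List.modifyHead_id]
  cases hs : pvSplit cs with
  | nil => exact absurd hs (pvSplit_ne_nil cs)
  | cons a r => simp [List.modifyHead]

theorem pvSplit_of_none (cs : List Char) (h : pvQ cs = none) : pvSplit cs = [cs] := by
  induction cs with
  | nil => simp [pvSplit]
  | cons c t ih =>
    simp only [pvQ, List.findIdx?_cons] at h
    by_cases hc : c = '"'
    · simp [hc] at h
    · have hcb : (c == '"') = false := by simp [hc]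
      simp only [hcb, Bool.false_eq_true, if_false] at h
      have ht : pvQ t = none := by
        simp only [pvQ]
        cases h2 : t.findIdx? (· == '"') with
        | none => rfl
        | some j => simp [h2] at h
      simp [pvSplit, if_neg hc, ih ht, List.modifyHead]

theorem pvSplit_of_some (cs : List Char) (j : Nat) (h : pvQ cs = some j) :
    pvSplit cs = cs.take j :: pvSplit (cs.drop (j + 1)) := by
  induction cs generalizing j with
  | nil => simp [pvQ] at h
  | cons c t ih =>
    simp only [pvQ, List.findIdx?_cons] at h
    by_cases hc : c = '"'
    · have hcb : (c == '"') = true := by simp [hc]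
      simp only [hcb] at h
      have hj : j = 0 := by simpa using h.symm
      subst hj
      simp [pvSplit, hc]
    · have hcb : (c == '"') = false := by simp [hc]
      simp only [hcb, Bool.false_eq_true, if_false] at h
      cases h2 : t.findIdx? (· == '"') with
      | none => simp [h2] at h
      | some j' =>
        have hj : j = j' + 1 := by simp [h2] at h; omega
        subst hj
        rw [show pvQ t = some j' from h2] at ih
        simp only [pvSplit, if_neg hc, ih j' rfl]
        simp [List.modifyHead]

-- phase 2 of A's loop: first quote found at sq >= 0, scanning for the closing quote
theorem pvALoop_phase2 (cs : List Char) (off : Nat) (st : Int) (sq : Int)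
    (hst : st ≤ (off : Int)) (hsq : 0 ≤ sq) :
    pvALoop (PySem.List.enumerate cs (off : Int)) st sq (-1) =
      (sq, match pvQ cs with
           | none => -1
           | some j => ((off + j : Nat) : Int)) := by
  induction cs generalizing off with
  | nil => simp [PySem.List.enumerate, pvALoop, pvQ]
  | cons c t ih =>
    rw [PySem.List.enumerate_cons]
    have hne : (sq == -1) = false := by simp; omega
    by_cases hc : c = '"'
    · simp [pvALoop, if_pos hst, hc, hne, pvQ, List.findIdx?_cons]
    · have hcb : (c == '"') = false := by simp [hc]
      simp only [pvALoop, if_pos hst, hcb, hne, Bool.false_and, Bool.false_eq_true, if_false]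
      have h1 : ((off : Int) + 1) = ((off + 1 : Nat) : Int) := by push_cast; ring
      rw [h1, ih (off + 1) (by push_cast; omega)]
      simp only [pvQ, List.findIdx?_cons, hcb, Bool.false_eq_true, if_false]
      cases h : t.findIdx? (· == '"') with
      | none => simp [h]
      | some j => simp [h] <;> (push_cast; ring)

-- phase 1 of A's loop: both flags still -1, every index from off on passes the start test
theorem pvALoop_phase1 (cs : List Char) (off : Nat) (st : Int)
    (hst : st ≤ (off : Int)) :
    pvALoop (PySem.List.enumerate cs (off : Int)) st (-1) (-1) =
      (match pvQ cs with
       | none => (-1, -1)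
       | some j =>
         (((off + j : Nat) : Int),
          match pvQ (cs.drop (j + 1)) with
          | none => -1
          | some j2 => ((off + j + 1 + j2 : Nat) : Int))) := by
  induction cs generalizing off with
  | nil => simp [PySem.List.enumerate, pvALoop, pvQ]
  | cons c t ih =>
    rw [PySem.List.enumerate_cons]
    by_cases hc : c = '"'
    · have hcb : (c == '"') = true := by simp [hc]
      simp only [pvALoop, if_pos hst, hcb, Bool.true_and, beq_self_eq_true, if_pos]
      have h1 : ((off : Int) + 1) = ((off + 1 : Nat) : Int) := by push_cast; ring
      rw [h1, pvALoop_phase2 t (off + 1) st (off : Int) (by push_cast; omega) (by omega)]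
      simp only [pvQ, List.findIdx?_cons, hcb, if_pos]
      simp only [List.drop_succ_cons, List.drop_zero]
      cases h : t.findIdx? (· == '"') with
      | none => simp [pvQ, h]
      | some j2 => simp [pvQ, h, Prod.ext_iff] <;> (push_cast; ring)
    · have hcb : (c == '"') = false := by simp [hc]
      simp only [pvALoop, if_pos hst, hcb, Bool.false_and, Bool.false_eq_true, if_false]
      have h1 : ((off : Int) + 1) = ((off + 1 : Nat) : Int) := by push_cast; ring
      rw [h1, ih (off + 1) (by push_cast; omega)]
      simp only [pvQ, List.findIdx?_cons, hcb, Bool.false_eq_true, if_false]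
      cases h : t.findIdx? (· == '"') with
      | none => simp [h]
      | some j =>
        simp only [h, Option.map_some]
        simp only [List.drop_succ_cons]
        cases h2 : (t.drop (j + 1)).findIdx? (· == '"') with
        | none => simp [h2, Prod.ext_iff] <;> (push_cast; ring)
        | some j2 => simp [h2, Prod.ext_iff] <;> (push_cast; ring)

-- indices below st fail the start test: the loop skips the first st - off characters
theorem pvALoop_skip (cs : List Char) (off : Nat) (st : Nat) (hoff : off ≤ st) :
    pvALoop (PySem.List.enumerate cs (off : Int)) (st : Int) (-1) (-1) =
      pvALoop (PySem.List.enumerate (cs.drop (st - off)) (st : Int)) (st : Int) (-1) (-1) := by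
  induction cs generalizing off with
  | nil => simp
  | cons c t ih =>
    by_cases he : off = st
    · subst he; simp
    · have hlt : off < st := by omega
      rw [PySem.List.enumerate_cons]
      have hcond : ¬ ((st : Int) ≤ (off : Int)) := by push_cast; omega
      simp only [pvALoop, if_neg hcond]
      have h1 : ((off : Int) + 1) = ((off + 1 : Nat) : Int) := by push_cast; ring
      rw [h1, ih (off + 1) (by omega)]
      have : (c :: t).drop (st - off) = t.drop (st - (off + 1)) := by
        have h2 : st - off = (st - (off + 1)) + 1 := by omega
        rw [h2, List.drop_succ_cons]
      rw [this]

-- ===== VERDICT (by name: the statement is the Claim_ definition above) =====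
theorem GetQuotedStringAfterLabel_spec : Claim_equal_GetQuotedStringAfterLabel := by
  unfold Claim_equal_GetQuotedStringAfterLabel
  intro s label _
  unfold Spec_GetQuotedStringAfterLabel GetQuotedStringAfterLabel GetQuotedStringAfterLabel_alt
  by_cases hin : PySem.Str.isIn label s = true
  swap
  · have h0 : PySem.Chars.isIn label.toList s.toList ≠ true := by
      simpa [PySem.Str.isIn] using hin
    simp [h0]
  · rw [if_pos hin, if_pos hin]
    simp only [PySem.Str.find, PySem.Str.len]
    have hge : 0 ≤ PySem.Chars.find s.toList label.toList := by
      have h1 := PySem.Chars.find_nonneg_iff (s := s.toList) (sub := label.toList)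
      have h2 := PySem.Chars.isIn_iff_infix (sub := label.toList) (s := s.toList)
      have : PySem.Chars.isIn label.toList s.toList = true := by
        simpa [PySem.Str.isIn] using hin
      exact h1.mpr (h2.mp this)
    set f := PySem.Chars.find s.toList label.toList with hf
    set stN : Nat := (f + label.toList.length).toNat with hstN
    have hst : f + (label.toList.length : Int) = (stN : Int) := by omega
    -- B side: the tail is s.toList.drop stN
    have htail : (PySem.Str.slice s (some (f + (label.toList.length : Int))) none).toList
        = s.toList.drop stN := by
      rw [PySem.Str.toList_slice, PySem.Chars.slice_eq_listSlice, hst,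
        PySem.List.slice_from_natCast]
    rw [htail, pvSplitOn_quote]
    -- A side: reduce the loop
    have hskip := pvALoop_skip s.toList 0 stN (by omega)
    simp only [Nat.cast_zero, Nat.sub_zero] at hskip
    rw [hst, hskip, pvALoop_phase1 (s.toList.drop stN) stN (stN : Int) (by omega)]
    set cs := s.toList.drop stN with hcs
    cases h1 : pvQ cs with
    | none =>
      rw [pvSplit_of_none cs h1]
      simp
    | some j1 =>
      simp only []
      rw [pvSplit_of_some cs j1 h1]
      cases h2 : pvQ (cs.drop (j1 + 1)) with
      | none =>
        rw [pvSplit_of_none _ h2]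
        have hcond : ¬ (0 ≤ ((stN + j1 : Nat) : Int) ∧ ((stN + j1 : Nat) : Int) < -1) := by
          push_cast; omega
        rw [if_neg hcond, if_neg (by simp)]
      | some j2 =>
        rw [pvSplit_of_some _ j2 h2]
        have hcond : 0 ≤ ((stN + j1 : Nat) : Int) ∧ ((stN + j1 : Nat) : Int) < ((stN + j1 + 1 + j2 : Nat) : Int) := by
          push_cast; omega
        rw [if_pos hcond]
        have hlen : 3 ≤ (cs.take j1 :: (cs.drop (j1 + 1)).take j2 :: pvSplit ((cs.drop (j1 + 1)).drop (j2 + 1))).length := by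
          simp only [List.length_cons]
          have := pvSplit_ne_nil ((cs.drop (j1 + 1)).drop (j2 + 1))
          cases hp : pvSplit ((cs.drop (j1 + 1)).drop (j2 + 1)) with
          | nil => exact absurd hp this
          | cons a r => simp [hp]
        rw [if_pos hlen]
        -- both sides are (cs.drop (j1+1)).take j2 as a string
        apply String.toList_inj.mp
        rw [PySem.Str.toList_slice, PySem.Chars.slice_eq_listSlice]
        simp only []
        have hc1 : ((stN + j1 : Nat) : Int) + 1 = ((stN + j1 + 1 : Nat) : Int) := by push_cast; ring
        rw [hc1, show ((stN + j1 + 1 + j2 : Nat) : Int) = (((stN + j1 + 1) : Nat) : Int) + ((j2 : Nat) : Int) from by push_cast; ring,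
          PySem.List.slice_natCast_add]
        simp only [List.getD]
        rw [hcs]
        simp only [List.drop_drop, Nat.add_assoc]
        exact String.toList_ofList.symm
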